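-- pv_equiv track=rewrite | github.com/ratdias/Word-Search- | word_search.py | write_words
-- ===== SOURCE A (Python) =====
-- def get_size(grid):
--     #define the variables and return the tuple containing the height and length
--     height = len(grid)
--     width = len(grid[0])
--     return (width, height)
--
-- def separate(word):
--     separated_word = []
--     #iterate through the word, and append every letter to the list
--     for i in word:
--         separated_word.append(i)
--         #return list
--     return separated_word
--
-- def write_words(grid, position, direction, word):
--     #use get_size function to define the dimensions of the grid and initialize the variables
--     (width, height) = get_size(grid)
--     separated_word = separate(word)
--     (y, x) = position
--     #iterate over the length of the word to be written
--     for i in range(len(word)):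
--         #if the position go over the border of the grid break the loop
--         if x >= width or y >= height:
--             break
--         if x < 0 or y < 0:
--             break
--             #write each letter of the word at the correct posistion and change the coordinates by adding the direction for the next letter
--         grid[y][x] = separated_word[i]
--         x += direction[0]
--         y += direction[1]
--     return grid
-- ===== SOURCE B (Python) =====
-- def write_words(grid, position, direction, word):
--     # Closed-form: count how many letters fit, then one unconditional write loop.
--     (y, x) = position
--     dx, dy = direction[0], direction[1]
--     height = len(grid)
--     width = len(grid[0])
--
--     def axis(p, s, limit):
--         # number of in-bounds steps along one axis starting at p with step s
--         if not (0 <= p < limit):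
--             return 0
--         if s == 0:
--             return len(word)
--         if s > 0:
--             return (limit - 1 - p) // s + 1
--         return p // (-s) + 1
--
--     k = min(len(word), axis(x, dx, width), axis(y, dy, height))
--     for i in range(k):
--         grid[y + i * dy][x + i * dx] = word[i]
--     return grid
-- ===== Notes on version B (the rewrite author's own statement) =====
-- stated objective: simpler
-- what changed: Replaces the per-step bounds-checked write loop (and the get_size/separate helpers) with a closed-form count k of how many letters fit along each axis, followed by a single unconditional write loop of k letters.
import Mathlib
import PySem

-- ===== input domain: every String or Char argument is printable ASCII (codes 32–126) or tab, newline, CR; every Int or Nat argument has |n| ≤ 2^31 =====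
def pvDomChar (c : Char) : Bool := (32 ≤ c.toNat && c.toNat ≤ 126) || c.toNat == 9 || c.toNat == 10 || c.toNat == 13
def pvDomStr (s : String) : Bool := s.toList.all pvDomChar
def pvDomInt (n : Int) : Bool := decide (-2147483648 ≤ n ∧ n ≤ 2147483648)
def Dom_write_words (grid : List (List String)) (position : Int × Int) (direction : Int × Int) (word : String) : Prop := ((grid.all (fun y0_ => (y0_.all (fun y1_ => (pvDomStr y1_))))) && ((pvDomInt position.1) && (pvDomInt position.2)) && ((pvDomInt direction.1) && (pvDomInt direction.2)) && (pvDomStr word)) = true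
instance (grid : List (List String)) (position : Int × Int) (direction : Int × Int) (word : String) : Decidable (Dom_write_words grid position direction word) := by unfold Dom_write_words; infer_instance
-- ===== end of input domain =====

-- B changes the algorithm (closed-form in-bounds count, then an unconditional write
-- loop) but keeps A's behaviour; both Pythons mutate `grid` in place and return it —
-- the Lean equivalence is about the returned grid (which is the same object).

-- ===== PORT A =====
-- grid[r][c] = v for 0 ≤ c < len(grid[r]), 0 ≤ r < len(grid): exact on in-range
-- nonnegative indices (the only way either Python reaches it inside Pre_).
def setCell (g : List (List String)) (r c : Int) (v : String) : List (List String) :=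
  g.modify r.toNat (fun row => row.set c.toNat v)

def get_size (grid : List (List String)) : Int × Int :=
  -- len(grid[0]) raises IndexError on an empty grid; excluded by Pre_write_words
  (((grid.headD []).length : Int), (grid.length : Int))

def separate (word : String) : List String :=
  word.toList.foldl (fun acc c => acc ++ [String.mk [c]]) []

-- the for-loop of A: iterates over the letters, breaking on an out-of-bounds position
def writeLoopA (dx dy width height : Int) : List String → List (List String) → Int → Int → List (List String)
  | [], g, _, _ => g
  | c :: rest, g, x, y =>
    if x ≥ width ∨ y ≥ height then g
    else if x < 0 ∨ y < 0 then g
    else writeLoopA dx dy width height rest (setCell g y x c) (x + dx) (y + dy)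

def write_words (grid : List (List String)) (position : Int × Int) (direction : Int × Int) (word : String) : List (List String) :=
  let wh := get_size grid
  let separated_word := separate word
  writeLoopA direction.1 direction.2 wh.1 wh.2 separated_word grid position.2 position.1

-- ===== PORT B =====
-- number of in-bounds steps along one axis (n = len(word) stands in for "unbounded")
def axisCount (n p s limit : Int) : Int :=
  if ¬ (0 ≤ p ∧ p < limit) then 0
  else if s = 0 then n
  else if 0 < s then PySem.Int.floordiv (limit - 1 - p) s + 1
  else PySem.Int.floordiv p (-s) + 1

def write_words_alt (grid : List (List String)) (position : Int × Int) (direction : Int × Int) (word : String) : List (List String) :=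
  let y := position.1
  let x := position.2
  let dx := direction.1
  let dy := direction.2
  let height : Int := grid.length
  let width : Int := (grid.headD []).length
  let letters := word.toList
  let n : Int := letters.length
  let k := min n (min (axisCount n x dx width) (axisCount n y dy height))
  (List.range k.toNat).foldl
    (fun g (i : Nat) => setCell g (y + (i : Int) * dy) (x + (i : Int) * dx) (String.mk [letters.getD i ' '])) grid

-- ===== PRECONDITION & SPEC =====
-- Pre_ excludes the empty grid (A raises IndexError in get_size) and inputs whose word ray
-- passes, inside the width x height box, through a cell of a ragged row too short to hold it
-- (there A's write grid[y][x] can raise IndexError; on a rectangular grid Pre_ is just grid nonempty).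
def Pre_write_words (grid : List (List String)) (position : Int × Int) (direction : Int × Int) (word : String) : Prop :=
  grid ≠ [] ∧ ∀ i : Nat, i < word.toList.length →
    ((0 ≤ position.2 + (i : Int) * direction.1 ∧
      position.2 + (i : Int) * direction.1 < ((grid.headD []).length : Int) ∧
      0 ≤ position.1 + (i : Int) * direction.2 ∧
      position.1 + (i : Int) * direction.2 < (grid.length : Int)) →
     position.2 + (i : Int) * direction.1 < ((grid.getD (position.1 + (i : Int) * direction.2).toNat []).length : Int))
instance (grid : List (List String)) (position : Int × Int) (direction : Int × Int) (word : String) : Decidable (Pre_write_words grid position direction word) := by unfold Pre_write_words; infer_instance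

def pvWitness_write_words : List (List String) × (Int × Int) × (Int × Int) × String :=
  ([["a", "b"], ["c", "d"]], (0, 0), (1, 0), "xy")

def Spec_write_words (grid : List (List String)) (position : Int × Int) (direction : Int × Int) (word : String) (out : List (List String)) : Prop := out = write_words_alt grid position direction word
instance (grid : List (List String)) (position : Int × Int) (direction : Int × Int) (word : String) (out : List (List String)) : Decidable (Spec_write_words grid position direction word out) := by unfold Spec_write_words; infer_instance

-- ===== CLAIM (what is proved, stated in full; the proofs are below) =====
def Claim_equal_write_words : Prop := ∀ (grid : List (List String)) (position : Int × Int) (direction : Int × Int) (word : String), Dom_write_words grid position direction word → Pre_write_words grid position direction word → Spec_write_words grid position direction word (write_words grid position direction word)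

-- ===== LEMMAS AND PROOFS =====

def InB (width height x y : Int) : Prop := 0 ≤ x ∧ x < width ∧ 0 ≤ y ∧ y < height

theorem axisCount_mem (n p s limit i : Int) (hi : 0 ≤ i)
    (h : i < axisCount n p s limit) : 0 ≤ p + i * s ∧ p + i * s < limit := by
  unfold axisCount at h
  by_cases h1 : 0 ≤ p ∧ p < limit
  · rw [if_neg (not_not_intro h1)] at h
    by_cases h2 : s = 0
    · subst h2; simpa using h1
    · rw [if_neg h2] at h
      by_cases h3 : 0 < s
      · rw [if_pos h3] at h
        have hle : i ≤ PySem.Int.floordiv (limit - 1 - p) s := by omega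
        have hmul := (PySem.Int.le_floordiv_iff_mul_le (a := limit - 1 - p) (b := s) (q := i) h3).mp hle
        have hnn : 0 ≤ i * s := mul_nonneg hi (le_of_lt h3)
        constructor <;> nlinarith [h1.1, h1.2]
      · rw [if_neg h3] at h
        have hs : 0 < -s := by omega
        have hle : i ≤ PySem.Int.floordiv p (-s) := by omega
        have hmul := (PySem.Int.le_floordiv_iff_mul_le (a := p) (b := -s) (q := i) hs).mp hle
        have hnp : i * s ≤ 0 := by nlinarith
        constructor <;> nlinarith [h1.1, h1.2]
  · rw [if_pos h1] at h; omega

theorem axisCount_stop (n p s limit : Int) (hk : axisCount n p s limit < n) :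
    ¬ (0 ≤ p + axisCount n p s limit * s ∧ p + axisCount n p s limit * s < limit) := by
  unfold axisCount at *
  by_cases h1 : 0 ≤ p ∧ p < limit
  · rw [if_neg (not_not_intro h1)] at *
    by_cases h2 : s = 0
    · rw [if_pos h2] at hk; omega
    · rw [if_neg h2] at *
      by_cases h3 : 0 < s
      · rw [if_pos h3] at *
        set q := PySem.Int.floordiv (limit - 1 - p) s with hq
        rintro ⟨_, hlt⟩
        have hbr : limit - 1 - p < (q + 1) * s :=
          (PySem.Int.floordiv_lt_iff_lt_mul (a := limit - 1 - p) (b := s) (q := q + 1) h3).mp (by omega)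
        nlinarith
      · rw [if_neg h3] at *
        have hs : 0 < -s := by omega
        set q := PySem.Int.floordiv p (-s) with hq
        rintro ⟨hge, _⟩
        have hbr : p < (q + 1) * (-s) :=
          (PySem.Int.floordiv_lt_iff_lt_mul (a := p) (b := -s) (q := q + 1) hs).mp (by omega)
        nlinarith
  · rw [if_pos h1] at *
    simp only [zero_mul, add_zero]
    omega

theorem axisCount_nonneg (n p s limit : Int) (hn : 0 ≤ n) : 0 ≤ axisCount n p s limit := by
  unfold axisCount
  by_cases h1 : 0 ≤ p ∧ p < limit
  · rw [if_neg (not_not_intro h1)]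
    by_cases h2 : s = 0
    · rw [if_pos h2]; exact hn
    · rw [if_neg h2]
      by_cases h3 : 0 < s
      · rw [if_pos h3]
        have : 0 ≤ PySem.Int.floordiv (limit - 1 - p) s :=
          (PySem.Int.le_floordiv_iff_mul_le (q := 0) h3).mpr (by nlinarith [h1.1, h1.2])
        omega
      · rw [if_neg h3]
        have hs : 0 < -s := by omega
        have : 0 ≤ PySem.Int.floordiv p (-s) :=
          (PySem.Int.le_floordiv_iff_mul_le (q := 0) hs).mpr (by nlinarith [h1.1])
        omega
  · rw [if_pos h1]

theorem separate_eq (word : String) : separate word = word.toList.map (fun c => String.mk [c]) := by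
  unfold separate
  suffices h : ∀ (l : List Char) (acc : List String),
      l.foldl (fun acc c => acc ++ [String.mk [c]]) acc = acc ++ l.map (fun c => String.mk [c]) by
    simpa using h word.toList []
  intro l
  induction l with
  | nil => simp
  | cons c t ih => intro acc; simp [ih]

-- the two loops coincide when k counts exactly the in-bounds prefix
theorem loop_eq (dx dy width height : Int) :
    ∀ (k : Nat) (letters : List Char) (g : List (List String)) (x y : Int),
    k ≤ letters.length →
    (∀ i : Nat, i < k → InB width height (x + (i : Int) * dx) (y + (i : Int) * dy)) →
    (k = letters.length ∨ ¬ InB width height (x + (k : Int) * dx) (y + (k : Int) * dy)) →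
    writeLoopA dx dy width height (letters.map (fun c => String.mk [c])) g x y =
      (List.range k).foldl
        (fun g (i : Nat) => setCell g (y + (i : Int) * dy) (x + (i : Int) * dx) (String.mk [letters.getD i ' '])) g := by
  intro k
  induction k with
  | zero =>
    intro letters g x y _ _ hstop
    cases letters with
    | nil => simp [writeLoopA]
    | cons c t =>
      rcases hstop with h | h
      · simp at h
      · simp only [InB, not_and_or, not_le, not_lt, Nat.cast_zero, zero_mul, add_zero] at h
        simp only [List.map_cons, writeLoopA, List.range_zero]
        split_ifs with h1 h2 <;> [rfl; rfl; omega]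
  | succ k ih =>
    intro letters g x y hlen hin hstop
    cases letters with
    | nil => simp at hlen
    | cons c t =>
      have h0 := hin 0 (Nat.succ_pos k)
      simp only [InB, Nat.cast_zero, zero_mul, add_zero] at h0
      simp only [List.map_cons, writeLoopA]
      rw [if_neg (by omega), if_neg (by omega)]
      rw [List.range_succ_eq_map]
      simp only [List.foldl_cons, List.foldl_map, Nat.cast_zero, zero_mul, add_zero,
        List.getD_cons_zero]
      rw [ih t (setCell g y x (String.mk [c])) (x + dx) (y + dy)
        (by simpa using hlen)
        (by
          intro i hi
          have := hin (i + 1) (by omega)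
          simp only [InB] at this ⊢
          push_cast at this ⊢
          constructor; · nlinarith [this.1]
          refine ⟨by nlinarith [this.2.1], by nlinarith [this.2.2.1], by nlinarith [this.2.2.2]⟩)
        (by
          rcases hstop with h | h
          · left; simpa using h
          · right
            simp only [InB] at h ⊢
            push_cast at h ⊢
            intro hc; apply h
            refine ⟨by nlinarith [hc.1], by nlinarith [hc.2.1], by nlinarith [hc.2.2.1], by nlinarith [hc.2.2.2]⟩)]
      apply List.foldl_ext
      intro g' i _
      have h1 : (y + dy) + (i : Int) * dy = y + ((i.succ : Nat) : Int) * dy := by push_cast; ring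
      have h2 : (x + dx) + (i : Int) * dx = x + ((i.succ : Nat) : Int) * dx := by push_cast; ring
      rw [h1, h2]
      rfl

-- ===== VERDICT (by name: the statement is the Claim_ definition above) =====
theorem write_words_spec : Claim_equal_write_words := by
  intro grid position direction word _ _
  unfold Spec_write_words write_words write_words_alt get_size
  rw [separate_eq]
  have hn0 : (0 : Int) ≤ (word.toList.length : Int) := Int.natCast_nonneg _
  set dx := direction.1 with hdx
  set dy := direction.2 with hdy
  set x := position.2 with hx
  set y := position.1 with hy
  set width : Int := ((grid.headD []).length : Int) with hw
  set height : Int := (grid.length : Int) with hh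
  set n : Int := (word.toList.length : Int) with hn
  set kx := axisCount n x dx width with hkx
  set ky := axisCount n y dy height with hky
  set k := min n (min kx ky) with hk
  have hkx0 : 0 ≤ kx := axisCount_nonneg _ _ _ _ hn0
  have hky0 : 0 ≤ ky := axisCount_nonneg _ _ _ _ hn0
  have hk0 : 0 ≤ k := by simp only [hk]; omega
  have hkn : k ≤ n := by simp only [hk]; omega
  have hkcast : (k.toNat : Int) = k := Int.toNat_of_nonneg hk0
  have hlen : k.toNat ≤ word.toList.length := by omega
  have hin : ∀ i : Nat, i < k.toNat →
      InB width height (x + (i : Int) * dx) (y + (i : Int) * dy) := by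
    intro i hi
    have hik : (i : Int) < k := by omega
    have hikx : (i : Int) < kx := by simp only [hk] at hik; omega
    have hiky : (i : Int) < ky := by simp only [hk] at hik; omega
    have h1 := axisCount_mem n x dx width i (Int.natCast_nonneg _) hikx
    have h2 := axisCount_mem n y dy height i (Int.natCast_nonneg _) hiky
    exact ⟨h1.1, h1.2, h2.1, h2.2⟩
  have hstop : k.toNat = word.toList.length ∨
      ¬ InB width height (x + (k.toNat : Int) * dx) (y + (k.toNat : Int) * dy) := by
    by_cases hke : k = n
    · left; omega
    · right
      have hklt : k < n := lt_of_le_of_ne hkn hke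
      rintro ⟨hc1, hc2, hc3, hc4⟩
      rw [hkcast] at hc1 hc2 hc3 hc4
      rcases le_total kx ky with hle | hle
      · have hkeq : k = kx := by simp only [hk]; omega
        rw [hkeq] at hc1 hc2
        exact axisCount_stop n x dx width (by omega) ⟨hc1, hc2⟩
      · have hkeq : k = ky := by simp only [hk]; omega
        rw [hkeq] at hc3 hc4
        exact axisCount_stop n y dy height (by omega) ⟨hc3, hc4⟩
  exact loop_eq dx dy width height k.toNat word.toList grid x y hlen hin hstop
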